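-- pv_equiv track=rewrite | github.com/opengisch/django-oapif | src/signalo/core/tests.py | is_dense_partial_order
-- ===== SOURCE A (Python) =====
-- from typing import Callable, Iterable, Tuple
--
-- def is_dense_partial_order(sorted_it: Iterable[int]) -> bool:
--     prev = 0
--     for i in sorted_it:
--         if i == prev + 1:
--             prev += 1
--             continue
--         elif i == prev:
--             continue
--         else:
--             return False
--     return True
-- ===== SOURCE B (Python) =====
-- def is_dense_partial_order(sorted_it):
--     xs = list(sorted_it)
--     if not xs:
--         return True
--     return xs == sorted(xs) and xs[0] in (0, 1) and set(xs) == set(range(xs[0], xs[-1] + 1))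
-- ===== Notes on version B (the rewrite author's own statement) =====
-- stated objective: alternative
-- what changed: Replaces A's accumulator loop over elements with a global characterization: the list equals its sorted form, its first element is 0 or 1, and its value set equals the contiguous range from the first to the last element.
import Mathlib
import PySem

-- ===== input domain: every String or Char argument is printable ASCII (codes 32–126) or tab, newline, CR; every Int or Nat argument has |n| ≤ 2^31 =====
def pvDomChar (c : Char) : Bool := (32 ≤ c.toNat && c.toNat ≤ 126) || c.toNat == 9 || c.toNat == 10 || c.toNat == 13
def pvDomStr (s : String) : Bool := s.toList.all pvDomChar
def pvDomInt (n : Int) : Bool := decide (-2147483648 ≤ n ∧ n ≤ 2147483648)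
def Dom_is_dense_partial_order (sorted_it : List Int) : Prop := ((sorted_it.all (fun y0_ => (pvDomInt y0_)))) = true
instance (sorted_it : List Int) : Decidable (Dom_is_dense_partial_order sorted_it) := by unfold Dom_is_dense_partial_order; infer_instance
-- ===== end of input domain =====

-- B replaces A's element-by-element accumulator loop with a global characterization:
-- the list is sorted, starts at 0 or 1, and its value SET equals a contiguous integer range (alternative algorithm).

-- ===== PORT A =====
-- A's loop threading `prev` through the elements.
def pvLoopA : Int → List Int → Bool
  | _, [] => true
  | prev, i :: rest =>
    if i = prev + 1 then pvLoopA (prev + 1) rest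
    else if i = prev then pvLoopA prev rest
    else false

def is_dense_partial_order (sorted_it : List Int) : Bool := pvLoopA 0 sorted_it

-- ===== PORT B =====
-- xs == sorted(xs) and xs[0] in (0, 1) and set(xs) == set(range(xs[0], xs[-1] + 1));
-- xs[-1] is ported as getLastD 0, exact here because the list is nonempty in this branch.
def is_dense_partial_order_alt (sorted_it : List Int) : Bool :=
  match sorted_it with
  | [] => true
  | x :: rest =>
    decide (x :: rest = PySem.List.sorted (x :: rest) (fun y => y) false) &&
    (x == 0 || x == 1) &&
    PySem.Set.equal (PySem.Set.ofList (x :: rest))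
      (PySem.Set.ofList (PySem.List.pyRange x ((x :: rest).getLastD 0 + 1) 1))

-- ===== PRECONDITION & SPEC =====
def Spec_is_dense_partial_order (sorted_it : List Int) (out : Bool) : Prop := out = is_dense_partial_order_alt sorted_it
instance (sorted_it : List Int) (out : Bool) : Decidable (Spec_is_dense_partial_order sorted_it out) := by unfold Spec_is_dense_partial_order; infer_instance

-- ===== CLAIM (what is proved, stated in full; the proofs are below) =====
def Claim_equal_is_dense_partial_order : Prop := ∀ (sorted_it : List Int), Dom_is_dense_partial_order sorted_it → Spec_is_dense_partial_order sorted_it (is_dense_partial_order sorted_it)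

-- ===== LEMMAS AND PROOFS =====
-- A's loop is the chain predicate "each element equals the previous one or the previous one + 1".
theorem pvLoopA_iff_chain (xs : List Int) : ∀ prev : Int,
    pvLoopA prev xs = true ↔ List.IsChain (fun a b => b = a ∨ b = a + 1) (prev :: xs) := by
  induction xs with
  | nil => intro prev; simp [pvLoopA, List.IsChain.singleton]
  | cons i rest ih =>
    intro prev
    rw [List.isChain_cons_cons]
    simp only [pvLoopA]
    by_cases h1 : i = prev + 1
    · subst h1; simp [ih]
    · by_cases h2 : i = prev
      · subst h2; simp [h1, ih]
      · simp only [if_neg h1, if_neg h2]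
        constructor
        · intro h; cases h
        · intro h; rcases h.1 with h | h <;> [exact absurd h h2; exact absurd h h1]

-- Membership in a dense chain is exactly the interval [head, last].
theorem dense_chain_mem : ∀ (rest : List Int) (x : Int),
    List.IsChain (fun a b => b = a ∨ b = a + 1) (x :: rest) →
    (∀ v : Int, v ∈ x :: rest ↔ x ≤ v ∧ v ≤ (x :: rest).getLastD 0) := by
  intro rest
  induction rest with
  | nil => intro x _ v; simp; omega
  | cons x' rest' ih =>
    intro x hch v
    rw [List.isChain_cons_cons] at hch
    have hstep := hch.1
    have hmem := ih x' hch.2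
    have hx'L : x' ≤ (x' :: rest').getLastD 0 := ((hmem x').mp (by simp)).2
    constructor
    · intro hv
      rcases List.mem_cons.mp hv with h | h
      · subst h; exact ⟨le_refl _, by simpa using le_trans (by omega) hx'L⟩
      · have := (hmem v).mp h
        exact ⟨by omega, by simpa using this.2⟩
    · intro ⟨hl, hr⟩
      by_cases hvx' : x' ≤ v
      · exact List.mem_cons_of_mem _ ((hmem v).mpr ⟨hvx', by simpa using hr⟩)
      · have : v = x := by omega
        simp [this]

-- A sorted list whose value set is the interval [head, M] is a dense chain.
theorem chain_of_dense : ∀ (rest : List Int) (x M : Int),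
    (x :: rest).Pairwise (· ≤ ·) →
    (∀ v : Int, v ∈ x :: rest ↔ x ≤ v ∧ v ≤ M) →
    List.IsChain (fun a b => b = a ∨ b = a + 1) (x :: rest) := by
  intro rest
  induction rest with
  | nil => intro x M _ _; exact List.IsChain.singleton x
  | cons x' rest' ih =>
    intro x M hpw hmem
    have hxx' : x ≤ x' := (List.pairwise_cons.mp hpw).1 x' (by simp)
    have hx'M : x' ≤ M := ((hmem x').mp (by simp)).2
    have hstep : x' = x ∨ x' = x + 1 := by
      by_contra hc
      rw [not_or] at hc
      have hx1 : x + 1 ∈ x :: x' :: rest' := (hmem (x + 1)).mpr ⟨by omega, by omega⟩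
      rcases List.mem_cons.mp hx1 with h | h
      · omega
      · rcases List.mem_cons.mp h with h | h
        · omega
        · have := (List.pairwise_cons.mp (List.pairwise_cons.mp hpw).2).1 _ h
          omega
    rw [List.isChain_cons_cons]
    refine ⟨hstep, ?_⟩
    refine ih x' M (List.pairwise_cons.mp hpw).2 (fun v => ?_)
    have hpw' := (List.pairwise_cons.mp (List.pairwise_cons.mp hpw).2).1
    constructor
    · intro hv
      refine ⟨?_, ((hmem v).mp (List.mem_cons_of_mem _ hv)).2⟩
      rcases List.mem_cons.mp hv with h | h
      · omega
      · have := hpw' v h; omega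
    · intro ⟨hl, hr⟩
      have hv : v ∈ x :: x' :: rest' := (hmem v).mpr ⟨by omega, hr⟩
      rcases List.mem_cons.mp hv with h | h
      · have : v = x' := by omega
        simp [this]
      · exact h

-- ===== VERDICT (by name: the statement is the Claim_ definition above) =====
theorem is_dense_partial_order_spec : Claim_equal_is_dense_partial_order := by
  intro xs _
  unfold Spec_is_dense_partial_order is_dense_partial_order is_dense_partial_order_alt
  match xs with
  | [] => rfl
  | x :: rest =>
    rw [Bool.eq_iff_iff, pvLoopA_iff_chain, List.isChain_cons_cons]
    simp only [Bool.and_eq_true, decide_eq_true_eq, Bool.or_eq_true, beq_iff_eq,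
      PySem.Set.equal_iff, PySem.Set.mem_ofList, PySem.List.mem_pyRange_one]
    constructor
    · intro ⟨hhead, hch⟩
      have hmem := dense_chain_mem rest x hch
      have hsorted : (x :: rest).Pairwise (· ≤ ·) := by
        rw [← List.isChain_iff_pairwise]
        exact hch.imp (fun h => by omega)
      refine ⟨⟨(PySem.List.sorted_eq_self_of_pairwise (x :: rest) (fun y => y) hsorted).symm, by omega⟩, fun v => ?_⟩
      rw [hmem v]; omega
    · intro ⟨⟨hsortedeq, hhead⟩, hset⟩
      have hpw : (x :: rest).Pairwise (· ≤ ·) := by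
        rw [hsortedeq]
        simpa using PySem.List.sorted_pairwise (xs := x :: rest) (key := fun y => y)
      have hmem : ∀ v : Int, v ∈ x :: rest ↔ x ≤ v ∧ v ≤ (x :: rest).getLastD 0 := by
        intro v; rw [hset v]; omega
      exact ⟨by omega, chain_of_dense rest x _ hpw hmem⟩
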